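-- pv_equiv track=rewrite | github.com/Jeeeyoungkim/coding-test-archive | 프로그래머스/1/135808. 과일 장수/과일 장수.py | solution
-- ===== SOURCE A (Python) =====
-- def solution(k, m, score):
--     answer = 0
--     apples = sorted(score, reverse=True)
--     score = []
--     temp = []
--
--     for apple in apples:
--         temp.append(apple)
--         if len(temp) == m:
--             score.append(min(temp))
--             temp = []
--
--     for i in range(len(score)):
--         answer += score[i] * m
--
--     return answer
-- ===== SOURCE B (Python) =====
-- def solution(k, m, score):
--     if m <= 0:
--         return 0
--     s = sorted(score)
--     n = len(s)
--     total = 0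
--     for j in range(1, n // m + 1):
--         total += s[n - j * m]
--     return m * total
-- ===== Notes on version B (the rewrite author's own statement) =====
-- stated objective: simpler
-- what changed: Instead of sorting descending and scanning with a temp buffer that collects groups of m and takes min of each, B sorts ascending once and directly sums every m-th element from the top (the minimum of each group is s[n-j*m]), eliminating the grouping loop and the min calls.
import Mathlib
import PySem

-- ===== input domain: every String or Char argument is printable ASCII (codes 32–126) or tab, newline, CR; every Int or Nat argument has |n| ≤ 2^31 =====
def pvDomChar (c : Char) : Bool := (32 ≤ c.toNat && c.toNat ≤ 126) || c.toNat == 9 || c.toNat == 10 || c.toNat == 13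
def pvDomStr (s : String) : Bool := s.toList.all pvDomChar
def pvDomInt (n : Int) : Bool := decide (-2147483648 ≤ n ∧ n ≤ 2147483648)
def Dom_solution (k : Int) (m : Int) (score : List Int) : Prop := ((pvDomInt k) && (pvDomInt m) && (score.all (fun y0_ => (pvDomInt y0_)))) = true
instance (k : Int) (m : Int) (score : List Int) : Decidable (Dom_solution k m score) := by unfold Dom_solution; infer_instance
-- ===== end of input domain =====

-- B replaces A's descending sort + temp-buffer grouping (min of each block of m) by one
-- ascending sort and a direct sum of every m-th element from the top; same value everywhere.

-- ===== PORT A =====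
-- min(temp) on a nonempty list (only called with temp nonempty, where min? = some _)
def minOfA (t : List Int) : Int := (PySem.List.min? t (fun x => x)).getD 0

-- loop body of A's first for-loop: state = (score, temp)
def stepA (m : Int) (st : List Int × List Int) (apple : Int) : List Int × List Int :=
  let temp := st.2 ++ [apple]
  if (temp.length : Int) = m then (st.1 ++ [minOfA temp], []) else (st.1, temp)

def solution (k : Int) (m : Int) (score : List Int) : Int :=
  let apples := PySem.List.sorted score (fun x => x) true
  let res := apples.foldl (stepA m) ([], [])
  (PySem.List.pyRange 0 (res.1.length : Int) 1).foldl
    (fun acc i => acc + (PySem.List.pyGetD res.1 i 0) * m) 0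

-- ===== PORT B =====
def solution_alt (k : Int) (m : Int) (score : List Int) : Int :=
  if m ≤ 0 then 0
  else
    let s := PySem.List.sorted score (fun x => x) false
    let n : Int := s.length
    let total := (PySem.List.pyRange 1 (PySem.Int.floordiv n m + 1) 1).foldl
      (fun acc j => acc + PySem.List.pyGetD s (n - j * m) 0) 0
    m * total

-- ===== PRECONDITION & SPEC =====
def Spec_solution (k : Int) (m : Int) (score : List Int) (out : Int) : Prop := out = solution_alt k m score
instance (k : Int) (m : Int) (score : List Int) (out : Int) : Decidable (Spec_solution k m score out) := by unfold Spec_solution; infer_instance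

-- ===== CLAIM (what is proved, stated in full; the proofs are below) =====
def Claim_equal_solution : Prop := ∀ (k : Int) (m : Int) (score : List Int), Dom_solution k m score → Spec_solution k m score (solution k m score)

-- ===== LEMMAS AND PROOFS =====

-- the minima A collects, one per full block of M, as a recursive function
def chunkMins (M : Nat) (l : List Int) : List Int :=
  if h : 0 < M ∧ M ≤ l.length then
    minOfA (l.take M) :: chunkMins M (l.drop M)
  else []
termination_by l.length
decreasing_by simp; omega

lemma chunkMins_pos (M : Nat) (l : List Int) (h1 : 0 < M) (h2 : M ≤ l.length) :
    chunkMins M l = minOfA (l.take M) :: chunkMins M (l.drop M) := by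
  conv_lhs => rw [chunkMins]
  rw [dif_pos ⟨h1, h2⟩]

lemma chunkMins_nil (M : Nat) (l : List Int) (h : ¬ (0 < M ∧ M ≤ l.length)) :
    chunkMins M l = [] := by
  conv_lhs => rw [chunkMins]
  rw [dif_neg h]

-- A's fold never fires when m ≤ 0
lemma foldA_nonpos (m : Int) (hm : m ≤ 0) :
    ∀ (l t s : List Int), (l.foldl (stepA m) (s, t)).1 = s := by
  intro l
  induction l with
  | nil => intro t s; rfl
  | cons a l ih =>
      intro t s
      simp only [List.foldl_cons, stepA]
      have : ¬ ((t ++ [a]).length : Int) = m := by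
        simp; omega
      simp only [this, ite_false]
      exact ih _ _

-- A's fold leaves state untouched when too few elements remain to fill the buffer
lemma foldA_small (M : Nat) :
    ∀ (l t s : List Int), t.length + l.length < M →
      l.foldl (stepA (M : Int)) (s, t) = (s, t ++ l) := by
  intro l
  induction l with
  | nil => intro t s h; simp
  | cons a l ih =>
      intro t s h
      simp only [List.foldl_cons, stepA]
      have : ¬ (((t ++ [a]).length : Int) = (M : Int)) := by
        simp at h ⊢; omega
      simp only [this, ite_false]
      rw [ih (t ++ [a]) s (by simp at h ⊢; omega)]
      simp

-- running exactly enough elements to fill the buffer emits min(temp) and clears it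
lemma foldA_fill (M : Nat) :
    ∀ (u t s : List Int), t.length + u.length = M → u ≠ [] →
      u.foldl (stepA (M : Int)) (s, t) = (s ++ [minOfA (t ++ u)], []) := by
  intro u
  induction u with
  | nil => intro t s h hne; exact absurd rfl hne
  | cons a u ih =>
      intro t s h hne
      simp only [List.foldl_cons, stepA]
      by_cases hu : u = []
      · subst hu
        have : ((t ++ [a]).length : Int) = (M : Int) := by simp at h ⊢; omega
        simp only [this, ite_true]
        simp
      · have : ¬ (((t ++ [a]).length : Int) = (M : Int)) := by
          have : 0 < u.length := List.length_pos_iff.mpr hu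
          simp at h ⊢; omega
        simp only [this, ite_false]
        rw [ih (t ++ [a]) s (by simp at h ⊢; omega) hu]
        simp

-- A's first loop computes exactly the block minima
lemma foldA_chunks (M : Nat) (hM : 0 < M) :
    ∀ (l s : List Int), (l.foldl (stepA (M : Int)) (s, [])).1 = s ++ chunkMins M l := by
  intro l
  induction hn : l.length using Nat.strong_induction_on generalizing l with
  | _ n ih =>
    subst hn
    intro s
    by_cases h : M ≤ l.length
    · have hsplit : l = l.take M ++ l.drop M := (List.take_append_drop M l).symm
      conv_lhs => rw [hsplit]
      rw [List.foldl_append]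
      rw [foldA_fill M (l.take M) [] s
            (by simp only [List.length_nil, List.length_take]; omega)
            (by intro he; have h0 := congrArg List.length he
                rw [List.length_take] at h0; simp only [List.length_nil] at h0; omega)]
      simp only [List.nil_append]
      rw [ih (l.drop M).length (by simp; omega) (l.drop M) rfl]
      rw [chunkMins_pos M l hM h]
      simp
    · rw [foldA_small M l [] s (by simp; omega)]
      rw [chunkMins_nil M l (by omega)]
      simp

-- the last element of a descending list is its minimum
lemma getLast_le_of_pairwise (l : List Int) (hp : l.Pairwise (fun a b => b ≤ a)) (hne : l ≠ []) :
    ∀ x ∈ l, l.getLast hne ≤ x := by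
  induction l with
  | nil => exact absurd rfl hne
  | cons a l ih =>
      intro x hx
      rcases List.pairwise_cons.mp hp with ⟨ha, hl⟩
      by_cases hl0 : l = []
      · subst hl0; simp at hx; simp [hx]
      · rw [List.getLast_cons hl0]
        rcases List.mem_cons.mp hx with rfl | hx
        · exact le_trans (ih hl hl0 _ (List.getLast_mem hl0)) (ha _ (List.getLast_mem hl0))
        · exact ih hl hl0 x hx

lemma minOfA_desc (l : List Int) (hp : l.Pairwise (fun a b => b ≤ a)) (hne : l ≠ []) :
    minOfA l = l.getLast hne := by
  cases hv : PySem.List.min? l (fun x => x) with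
  | none => exact absurd ((PySem.List.min?_eq_none_iff l (fun x => x)).mp hv) hne
  | some v =>
      have hmem := PySem.List.min?_mem hv
      have hmin := PySem.List.min?_isMin hv
      have h1 : v ≤ l.getLast hne := hmin _ (List.getLast_mem hne)
      have h2 : l.getLast hne ≤ v := getLast_le_of_pairwise l hp hne v hmem
      simp [minOfA, hv]
      omega

-- chunkMins of a descending list = the block-last elements, indexed
lemma chunkMins_desc (M : Nat) (hM : 0 < M) :
    ∀ (l : List Int), l.Pairwise (fun a b => b ≤ a) →
      chunkMins M l = (List.range (l.length / M)).map (fun i => l.getD (i * M + (M - 1)) 0) := by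
  intro l
  induction hn : l.length using Nat.strong_induction_on generalizing l with
  | _ n ih =>
    subst hn
    intro hp
    by_cases h : M ≤ l.length
    · rw [chunkMins_pos M l hM h]
      have htne : l.take M ≠ [] := by
        intro he; have h0 := congrArg List.length he
        rw [List.length_take] at h0; simp only [List.length_nil] at h0; omega
      rw [minOfA_desc (l.take M) (hp.sublist (List.take_sublist M l)) htne]
      rw [ih (l.drop M).length (by simp; omega) (l.drop M) rfl
            (hp.sublist (List.drop_sublist M l))]
      rw [Nat.div_eq_sub_div hM h, List.range_succ_eq_map]
      simp only [List.map_cons, List.map_map]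
      congr 1
      · rw [List.getLast_eq_getElem]
        simp only [List.length_take]
        rw [List.getElem_take]
        rw [List.getD_eq_getElem _ _ (by omega)]
        congr 1
        omega
      · simp only [List.length_drop]
        apply List.map_congr_left
        intro i hi
        simp only [Function.comp_apply]
        simp only [List.getD, List.getElem?_drop]
        congr 2
        simp only [Nat.succ_mul]
        omega
    · rw [chunkMins_nil M l (by omega)]
      rw [Nat.div_eq_of_lt (by omega)]
      simp

-- sorted descending is the reverse of sorted ascending (over Int)
lemma sorted_rev_eq_reverse (score : List Int) :
    PySem.List.sorted score (fun x => x) true = (PySem.List.sorted score (fun x => x) false).reverse := by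
  have h1 : ((PySem.List.sorted score (fun x => x) true).reverse).Perm
      (PySem.List.sorted score (fun x => x) false) :=
    ((List.reverse_perm _).trans (PySem.List.sorted_perm ..)).trans
      (PySem.List.sorted_perm ..).symm
  have h2 : ((PySem.List.sorted score (fun x => x) true).reverse).Pairwise (fun a b => a ≤ b) := by
    rw [List.pairwise_reverse]
    exact PySem.List.sorted_pairwise_rev ..
  have h3 : (PySem.List.sorted score (fun x => x) false).Pairwise (fun a b => a ≤ b) :=
    PySem.List.sorted_pairwise ..
  have := PySem.List.eq_of_perm_of_pairwise_le_of_injective (fun x => x)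
    (fun a b h => h) h1 h2 h3
  rw [← this, List.reverse_reverse]

lemma foldl_add_mul (m : Int) :
    ∀ (l : List Int) (a : Int), l.foldl (fun acc x => acc + x * m) a = a + l.sum * m := by
  intro l
  induction l with
  | nil => simp
  | cons x l ih => intro a; simp [ih]; ring

lemma foldl_add_f (f : Int → Int) :
    ∀ (l : List Int) (a : Int), l.foldl (fun acc j => acc + f j) a = a + (l.map f).sum := by
  intro l
  induction l with
  | nil => simp
  | cons x l ih => intro a; simp [ih]; ring

-- ===== VERDICT (by name: the statement is the Claim_ definition above) =====
theorem solution_spec : Claim_equal_solution := by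
  intro k m score _
  unfold Spec_solution solution solution_alt
  by_cases hm : m ≤ 0
  · -- temp never reaches length m ≤ 0: A returns 0 as well
    simp only [hm, if_pos]
    rw [foldA_nonpos m hm]
    simp [PySem.List.pyRange_one_eq_nil]
  · simp only [hm, ite_false]
    replace hm : 0 < m := by omega
    obtain ⟨M, rfl⟩ : ∃ M : Nat, m = (M : Int) := ⟨m.toNat, by omega⟩
    have hM : 0 < M := by exact_mod_cast hm
    set desc := PySem.List.sorted score (fun x => x) true with hdesc
    set asc := PySem.List.sorted score (fun x => x) false with hasc
    have hrev : desc = asc.reverse := sorted_rev_eq_reverse score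
    have hlen : desc.length = asc.length := by rw [hrev]; simp
    set n : Nat := asc.length with hn
    -- A side
    rw [foldA_chunks M hM desc []]
    simp only [List.nil_append]
    rw [chunkMins_desc M hM desc (PySem.List.sorted_pairwise_rev ..)]
    rw [PySem.List.foldl_pyRange_zero_pyGetD' _ 0 (fun acc x => acc + x * ((M : Nat) : Int)) 0]
    rw [foldl_add_mul]
    -- B side
    have hfd : PySem.Int.floordiv ((n : Nat) : Int) ((M : Nat) : Int) = ((n / M : Nat) : Int) :=
      PySem.Int.floordiv_natCast n M
    rw [hfd, PySem.List.pyRange_one]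
    simp only [add_sub_cancel_right, Int.toNat_natCast]
    rw [foldl_add_f, List.map_map]
    rw [hlen]
    -- termwise equality of the two sums over range (n / M)
    have hterm : ∀ i ∈ List.range (n / M),
        ((fun j => PySem.List.pyGetD asc ((n : Int) - j * (M : Int)) 0) ∘ fun k : Nat => (1 : Int) + (k : Int)) i
          = desc.getD (i * M + (M - 1)) 0 := by
      intro i hi
      simp only [Function.comp_apply]
      have him := List.mem_range.mp hi
      have hiM : i * M + M ≤ n := by
        calc i * M + M = (i + 1) * M := by ring
          _ ≤ (n / M) * M := Nat.mul_le_mul_right M (by omega)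
          _ ≤ n := Nat.div_mul_le_self n M
      have hidx : ((n : Int) - ((1 : Int) + (i : Int)) * (M : Int)) = ((n - (i * M + M) : Nat) : Int) := by
        push_cast [hiM]; ring
      rw [hidx, PySem.List.pyGetD_natCast]
      have h1 : i * M + (M - 1) < desc.length := by rw [hlen]; omega
      rw [List.getD_eq_getElem _ _ h1,
          List.getD_eq_getElem _ _ (show n - (i * M + M) < asc.length by omega)]
      simp only [hrev, List.getElem_reverse]
      congr 1
      have h3 : desc.length = n := hlen
      omega
    rw [List.map_congr_left hterm]
    ring
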